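-- pv_equiv track=rewrite | github.com/ouail-benredjem/ProjectPipelineAsCode | process/flink_stream.py | categorize_weather
-- ===== SOURCE A (Python) =====
-- def categorize_weather(weather_condition):
--     """
--     Categorize weather conditions into broader categories
--     """
--     if not weather_condition:
--         return "Unknown"
--
--     # Lowercase for easier matching
--     condition = weather_condition.lower()
--
--     # Clear conditions
--     if any(clear_term in condition for clear_term in ["clear", "sunny", "fair"]):
--         return "Clear"
--
--     # Rainy conditions
--     if any(rain_term in condition for rain_term in ["rain", "drizzle", "shower"]):
--         return "Rainy"
--
--     # Stormy conditions
--     if any(storm_term in condition for storm_term in ["storm", "thunder", "lightning", "thunderstorm"]):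
--         return "Stormy"
--
--     # Cloudy conditions
--     if any(cloudy_term in condition for cloudy_term in ["cloud", "overcast", "fog", "mist", "haze"]):
--         return "Cloudy"
--
--     # Snowy conditions
--     if any(snow_term in condition for snow_term in ["snow", "sleet", "hail", "ice", "blizzard", "frost"]):
--         return "Snowy"
--
--     # Default fallback
--     return "Other"
-- ===== SOURCE B (Python) =====
-- KEYWORD_PRIORITY = {
--     "clear": 0, "sunny": 0, "fair": 0,
--     "rain": 1, "drizzle": 1, "shower": 1,
--     "storm": 2, "thunder": 2, "lightning": 2, "thunderstorm": 2,
--     "cloud": 3, "overcast": 3, "fog": 3, "mist": 3, "haze": 3,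
--     "snow": 4, "sleet": 4, "hail": 4, "ice": 4, "blizzard": 4, "frost": 4,
-- }
-- LABELS = ["Clear", "Rainy", "Stormy", "Cloudy", "Snowy"]
--
--
-- def categorize_weather(weather_condition):
--     if not weather_condition:
--         return "Unknown"
--     condition = weather_condition.lower()
--     # scan the string position by position, keeping the best (lowest) priority
--     # of any keyword that starts there
--     best = len(LABELS)
--     for i in range(len(condition)):
--         for kw, pr in KEYWORD_PRIORITY.items():
--             if pr < best and condition.startswith(kw, i):
--                 best = pr
--     return LABELS[best] if best < len(LABELS) else "Other"
-- ===== Notes on version B (the rewrite author's own statement) =====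
-- stated objective: alternative
-- what changed: Instead of five early-return branch blocks each doing substring tests per category, B makes one scan over the positions of the lowercased string, testing which keywords start at each position and keeping the minimum category priority seen, then maps that priority to a label.
import Mathlib
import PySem

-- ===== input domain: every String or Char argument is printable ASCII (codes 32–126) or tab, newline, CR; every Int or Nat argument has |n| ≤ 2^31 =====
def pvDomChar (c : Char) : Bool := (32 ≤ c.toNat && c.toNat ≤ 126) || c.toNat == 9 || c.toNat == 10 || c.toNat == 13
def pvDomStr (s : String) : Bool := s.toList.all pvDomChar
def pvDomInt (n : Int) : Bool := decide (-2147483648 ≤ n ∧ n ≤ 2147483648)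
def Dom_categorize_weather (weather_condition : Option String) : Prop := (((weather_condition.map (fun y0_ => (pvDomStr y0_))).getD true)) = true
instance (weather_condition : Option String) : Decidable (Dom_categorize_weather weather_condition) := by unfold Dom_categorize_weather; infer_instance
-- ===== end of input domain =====

-- B replaces A's five early-return branch blocks (substring test per category) by a single
-- scan over the positions of the lowercased string that keeps the minimum priority of any
-- keyword starting there; an alternative algorithm of the same cost, not claimed faster.

-- ===== PORT A =====
def categorize_weather (weather_condition : Option String) : String :=
  match weather_condition with
  | none => "Unknown"
  | some s =>
    if s = "" then "Unknown"
    else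
      let condition := PySem.Str.lower s
      if ["clear", "sunny", "fair"].any (fun t => PySem.Str.isIn t condition) then "Clear"
      else if ["rain", "drizzle", "shower"].any (fun t => PySem.Str.isIn t condition) then "Rainy"
      else if ["storm", "thunder", "lightning", "thunderstorm"].any (fun t => PySem.Str.isIn t condition) then "Stormy"
      else if ["cloud", "overcast", "fog", "mist", "haze"].any (fun t => PySem.Str.isIn t condition) then "Cloudy"
      else if ["snow", "sleet", "hail", "ice", "blizzard", "frost"].any (fun t => PySem.Str.isIn t condition) then "Snowy"
      else "Other"

-- ===== PORT B =====
-- KEYWORD_PRIORITY dict of Source B (insertion order)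
def pvKeywordPriority : List (String × Nat) :=
  [("clear",0),("sunny",0),("fair",0),
   ("rain",1),("drizzle",1),("shower",1),
   ("storm",2),("thunder",2),("lightning",2),("thunderstorm",2),
   ("cloud",3),("overcast",3),("fog",3),("mist",3),("haze",3),
   ("snow",4),("sleet",4),("hail",4),("ice",4),("blizzard",4),("frost",4)]

def pvLabels : List String := ["Clear", "Rainy", "Stormy", "Cloudy", "Snowy"]

-- condition.startswith(kw, i) with 0 ≤ i ≤ len is exactly: kw is a prefix of condition[i:]
def categorize_weather_alt (weather_condition : Option String) : String :=
  match weather_condition with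
  | none => "Unknown"
  | some s =>
    if s = "" then "Unknown"
    else
      let condition := (PySem.Str.lower s).toList
      let best := (List.range condition.length).foldl
        (fun best i => pvKeywordPriority.foldl
          (fun best kp => if kp.2 < best ∧ kp.1.toList.isPrefixOf (condition.drop i) then kp.2 else best)
          best) pvLabels.length
      if best < pvLabels.length then pvLabels.getD best "Other" else "Other"

-- ===== PRECONDITION & SPEC =====
def Spec_categorize_weather (weather_condition : Option String) (out : String) : Prop := out = categorize_weather_alt weather_condition
instance (weather_condition : Option String) (out : String) : Decidable (Spec_categorize_weather weather_condition out) := by unfold Spec_categorize_weather; infer_instance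

-- ===== CLAIM (what is proved, stated in full; the proofs are below) =====
def Claim_equal_categorize_weather : Prop := ∀ (weather_condition : Option String), Dom_categorize_weather weather_condition → Spec_categorize_weather weather_condition (categorize_weather weather_condition)

-- ===== LEMMAS AND PROOFS =====

theorem pv_foldl_congr {A B : Type} (l : List A) (f g : B → A → B)
    (h : ∀ b a, a ∈ l → f b a = g b a) : ∀ b, l.foldl f b = l.foldl g b := by
  induction l with
  | nil => intro b; rfl
  | cons x l ih =>
    intro b
    rw [List.foldl_cons, List.foldl_cons, h b x List.mem_cons_self]
    exact ih (fun b a ha => h b a (List.mem_cons_of_mem x ha)) (g b x)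

-- the matched-priority list B's double fold takes the minimum of
def pvMatched (c : List Char) : List Nat :=
  (List.range c.length).flatMap (fun i =>
    pvKeywordPriority.filterMap (fun kp =>
      if kp.1.toList.isPrefixOf (c.drop i) then some kp.2 else none))

theorem pv_inner_eq (d : List Char) (L : List (String × Nat)) : ∀ (b : Nat),
    L.foldl (fun b kp => if kp.2 < b ∧ kp.1.toList.isPrefixOf d then kp.2 else b) b
    = (L.filterMap (fun kp => if kp.1.toList.isPrefixOf d then some kp.2 else none)).foldl min b := by
  induction L with
  | nil => intro b; rfl
  | cons kp L ih =>
    intro b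
    by_cases h : kp.1.toList.isPrefixOf d = true
    · simp only [List.foldl_cons, List.filterMap_cons, h, if_pos, and_true]
      rw [ih]
      congr 1
      by_cases h2 : kp.2 < b <;> simp [h2] <;> omega
    · simp only [List.foldl_cons, List.filterMap_cons, h, and_false, if_false,
        Bool.false_eq_true]
      rw [ih]

theorem pv_fold_eq (c : List Char) (b : Nat) :
    (List.range c.length).foldl
        (fun best i => pvKeywordPriority.foldl
          (fun best kp => if kp.2 < best ∧ kp.1.toList.isPrefixOf (c.drop i) then kp.2 else best)
          best) b
    = (pvMatched c).foldl min b := by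
  unfold pvMatched
  rw [List.foldl_flatMap]
  exact (pv_foldl_congr _ _ _ (fun b i _ => (pv_inner_eq (c.drop i) pvKeywordPriority b).symm) b).symm

theorem pv_fmin_le_init (P : List Nat) : ∀ (a : Nat), P.foldl min a ≤ a := by
  induction P with
  | nil => intro a; exact le_refl a
  | cons x P ih => intro a; exact le_trans (ih (min a x)) (min_le_left a x)

theorem pv_fmin_le_mem (P : List Nat) : ∀ (a x : Nat), x ∈ P → P.foldl min a ≤ x := by
  induction P with
  | nil => intro a x h; cases h
  | cons y P ih =>
    intro a x h
    rcases List.mem_cons.mp h with h | h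
    · subst h; exact le_trans (pv_fmin_le_init P (min a x)) (min_le_right a x)
    · exact ih (min a y) x h

theorem pv_fmin_cases (P : List Nat) : ∀ (a : Nat), P.foldl min a = a ∨ P.foldl min a ∈ P := by
  induction P with
  | nil => intro a; exact Or.inl rfl
  | cons x P ih =>
    intro a
    rcases ih (min a x) with h | h
    · rcases min_choice a x with h2 | h2
      · exact Or.inl (by rw [List.foldl_cons, h, h2])
      · exact Or.inr (by rw [List.foldl_cons, h, h2]; exact List.mem_cons_self)
    · exact Or.inr (List.mem_cons_of_mem x h)

-- membership in pvMatched c ↔ some keyword of that priority is a substring of c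
theorem pv_mem_matched (c : List Char) (hc : c ≠ []) (p : Nat) :
    p ∈ pvMatched c ↔ ∃ kp ∈ pvKeywordPriority, kp.2 = p ∧ PySem.Chars.isIn kp.1.toList c = true := by
  unfold pvMatched
  simp only [List.mem_flatMap, List.mem_filterMap, List.mem_range]
  constructor
  · rintro ⟨i, hi, kp, hkp, h⟩
    by_cases hpre : kp.1.toList.isPrefixOf (c.drop i) = true
    · rw [if_pos hpre, Option.some.injEq] at h
      exact ⟨kp, hkp, h,
        (PySem.Chars.exists_prefix_drop_iff_isIn _ _).mp ⟨i, List.isPrefixOf_iff_prefix.mp hpre⟩⟩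
    · rw [if_neg hpre] at h; cases h
  · rintro ⟨kp, hkp, hp, hin⟩
    obtain ⟨j, hpre⟩ := (PySem.Chars.exists_prefix_drop_iff_isIn _ _).mpr hin
    by_cases hkw : kp.1.toList = []
    · refine ⟨0, by cases c with | nil => exact absurd rfl hc | cons x t => simp, kp, hkp, ?_⟩
      rw [if_pos (by rw [hkw]; exact List.isPrefixOf_iff_prefix.mpr (List.nil_prefix)), hp]
    · have hj : j < c.length := by
        by_contra hj
        have hnil : c.drop j = [] := List.drop_eq_nil_of_le (by omega)
        rw [hnil, List.prefix_nil] at hpre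
        exact hkw hpre
      exact ⟨j, hj, kp, hkp, by rw [if_pos (List.isPrefixOf_iff_prefix.mpr hpre)]; rw [hp]⟩

-- priority p is matched iff A's category-p 'any' test succeeds
theorem pv_matched_iff (s : String) (hs : (PySem.Str.lower s).toList ≠ []) (p : Nat) :
    p ∈ pvMatched (PySem.Str.lower s).toList ↔
      (p = 0 ∧ (["clear", "sunny", "fair"].any (fun t => PySem.Str.isIn t (PySem.Str.lower s))) = true) ∨
      (p = 1 ∧ (["rain", "drizzle", "shower"].any (fun t => PySem.Str.isIn t (PySem.Str.lower s))) = true) ∨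
      (p = 2 ∧ (["storm", "thunder", "lightning", "thunderstorm"].any (fun t => PySem.Str.isIn t (PySem.Str.lower s))) = true) ∨
      (p = 3 ∧ (["cloud", "overcast", "fog", "mist", "haze"].any (fun t => PySem.Str.isIn t (PySem.Str.lower s))) = true) ∨
      (p = 4 ∧ (["snow", "sleet", "hail", "ice", "blizzard", "frost"].any (fun t => PySem.Str.isIn t (PySem.Str.lower s))) = true) := by
  rw [pv_mem_matched _ hs]
  simp only [pvKeywordPriority, List.mem_cons, List.not_mem_nil, or_false, exists_eq_or_imp,
    exists_eq_left, List.any_cons, List.any_nil, Bool.or_false, Bool.or_eq_true,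
    PySem.Str.isIn_eq, and_or_left, or_assoc]
  simp only [eq_comm (α := ℕ)]

-- ===== VERDICT (by name: the statement is the Claim_ definition above) =====
theorem categorize_weather_spec : Claim_equal_categorize_weather := by
  intro wc _
  cases wc with
  | none => rfl
  | some s =>
    show categorize_weather (some s) = categorize_weather_alt (some s)
    by_cases hs : s = ""
    · subst hs; rfl
    · simp only [categorize_weather, categorize_weather_alt, if_neg hs]
      rw [pv_fold_eq]
      have hcne : (PySem.Str.lower s).toList ≠ [] := by
        rw [PySem.Str.toList_lower]
        unfold PySem.Chars.lower
        simp [List.map_eq_nil_iff, hs]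
      set c := (PySem.Str.lower s).toList with hc
      set r := (pvMatched c).foldl min pvLabels.length with hr
      have hinit : r ≤ 5 := by
        have := pv_fmin_le_init (pvMatched c) pvLabels.length
        simpa [pvLabels] using this
      have hcases := pv_fmin_cases (pvMatched c) pvLabels.length
      have hle : ∀ q ∈ pvMatched c, r ≤ q := fun q hq => pv_fmin_le_mem _ _ q hq
      have hiff : ∀ q, q ∈ pvMatched c ↔ _ := fun q => pv_matched_iff s hcne q
      by_cases h0 : (["clear", "sunny", "fair"].any (fun t => PySem.Str.isIn t (PySem.Str.lower s))) = true
      · have hle0 : r ≤ 0 := hle 0 ((hiff 0).mpr (Or.inl ⟨rfl, h0⟩))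
        have h : r = 0 := by omega
        rw [if_pos h0]; simp [h, pvLabels]
      · by_cases h1 : (["rain", "drizzle", "shower"].any (fun t => PySem.Str.isIn t (PySem.Str.lower s))) = true
        · have hle1 : r ≤ 1 := hle 1 ((hiff 1).mpr (Or.inr (Or.inl ⟨rfl, h1⟩)))
          have h : r = 1 := by
            rcases hcases with h | h
            · rw [← hr] at h; simp [pvLabels] at h; omega
            · rw [← hr] at h
              rcases (hiff r).mp h with ⟨he, hb⟩ | ⟨he, hb⟩ | ⟨he, hb⟩ | ⟨he, hb⟩ | ⟨he, hb⟩
              · exact absurd hb h0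
              all_goals omega
          rw [if_neg h0, if_pos h1]; simp [h, pvLabels]
        · by_cases h2 : (["storm", "thunder", "lightning", "thunderstorm"].any (fun t => PySem.Str.isIn t (PySem.Str.lower s))) = true
          · have hle2 : r ≤ 2 := hle 2 ((hiff 2).mpr (Or.inr (Or.inr (Or.inl ⟨rfl, h2⟩))))
            have h : r = 2 := by
              rcases hcases with h | h
              · rw [← hr] at h; simp [pvLabels] at h; omega
              · rw [← hr] at h
                rcases (hiff r).mp h with ⟨he, hb⟩ | ⟨he, hb⟩ | ⟨he, hb⟩ | ⟨he, hb⟩ | ⟨he, hb⟩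
                · exact absurd hb h0
                · exact absurd hb h1
                all_goals omega
            rw [if_neg h0, if_neg h1, if_pos h2]; simp [h, pvLabels]
          · by_cases h3 : (["cloud", "overcast", "fog", "mist", "haze"].any (fun t => PySem.Str.isIn t (PySem.Str.lower s))) = true
            · have hle3 : r ≤ 3 := hle 3 ((hiff 3).mpr (Or.inr (Or.inr (Or.inr (Or.inl ⟨rfl, h3⟩)))))
              have h : r = 3 := by
                rcases hcases with h | h
                · rw [← hr] at h; simp [pvLabels] at h; omega
                · rw [← hr] at h
                  rcases (hiff r).mp h with ⟨he, hb⟩ | ⟨he, hb⟩ | ⟨he, hb⟩ | ⟨he, hb⟩ | ⟨he, hb⟩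
                  · exact absurd hb h0
                  · exact absurd hb h1
                  · exact absurd hb h2
                  all_goals omega
              rw [if_neg h0, if_neg h1, if_neg h2, if_pos h3]; simp [h, pvLabels]
            · by_cases h4 : (["snow", "sleet", "hail", "ice", "blizzard", "frost"].any (fun t => PySem.Str.isIn t (PySem.Str.lower s))) = true
              · have hle4 : r ≤ 4 := hle 4 ((hiff 4).mpr (Or.inr (Or.inr (Or.inr (Or.inr ⟨rfl, h4⟩)))))
                have h : r = 4 := by
                  rcases hcases with h | h
                  · rw [← hr] at h; simp [pvLabels] at h; omega
                  · rw [← hr] at h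
                    rcases (hiff r).mp h with ⟨he, hb⟩ | ⟨he, hb⟩ | ⟨he, hb⟩ | ⟨he, hb⟩ | ⟨he, hb⟩
                    · exact absurd hb h0
                    · exact absurd hb h1
                    · exact absurd hb h2
                    · exact absurd hb h3
                    all_goals omega
                rw [if_neg h0, if_neg h1, if_neg h2, if_neg h3, if_pos h4]; simp [h, pvLabels]
              · have h : r = 5 := by
                  rcases hcases with h | h
                  · rw [← hr] at h; simpa [pvLabels] using h
                  · rw [← hr] at h
                    rcases (hiff r).mp h with ⟨he, hb⟩ | ⟨he, hb⟩ | ⟨he, hb⟩ | ⟨he, hb⟩ | ⟨he, hb⟩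
                    · exact absurd hb h0
                    · exact absurd hb h1
                    · exact absurd hb h2
                    · exact absurd hb h3
                    · exact absurd hb h4
                rw [if_neg h0, if_neg h1, if_neg h2, if_neg h3, if_neg h4]; simp [h, pvLabels]
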